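-- pv_equiv track=rewrite | github.com/Ujinkwon/Study | Programmers/92344.py | solution
-- ===== SOURCE A (Python) =====
-- def solution(board, skill):
--     answer = 0
--     check = [[0]*(len(board[0])+1) for _ in range(len(board)+1)]
--
--     for k in skill:
--         if k[0] == 1:
--             n = k[5]
--         else:
--             n = -k[5]
--         check[k[1]][k[2]] += n
--         check[k[3]+1][k[2]] -= n
--         check[k[1]][k[4]+1] -= n
--         check[k[3]+1][k[4]+1] += n
--
--     for i in range(len(check)-1):
--         for j in range(len(check[0])-1):
--             check[i][j+1] += check[i][j]
--     for i in range(len(check)-1):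
--         for j in range(len(check[0])-1):
--             check[i+1][j] += check[i][j]
--
--     for i in range(len(board)):
--         for j in range(len(board[0])):
--             if board[i][j] - check[i][j] > 0:
--                 answer += 1
--     return answer
-- ===== SOURCE B (Python) =====
-- def solution(board, skill):
--     rows, cols = len(board), len(board[0])
--     damage = [[0] * cols for _ in range(rows)]
--     for k in skill:
--         n = k[5] if k[0] == 1 else -k[5]
--         for i in range(k[1], k[3] + 1):
--             for j in range(k[2], k[4] + 1):
--                 damage[i][j] += n
--     count = 0
--     for i in range(rows):
--         for j in range(cols):
--             if board[i][j] - damage[i][j] > 0: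
--                 count += 1
--     return count
-- ===== Notes on version B (the rewrite author's own statement) =====
-- stated objective: alternative
-- what changed: B drops A's padded difference grid, corner-delta stamping and two prefix-sum passes: it builds a board-sized damage grid by adding each skill's amount directly over its whole rectangle, then counts surviving cells.
-- outside the precondition, e.g. on solution([[3], [2]], [[1, 0, -1, 1, 0, 5]]): A returns 2, B returns 0; on solution([[0], [0], [0]], [[1, 2, 0, 0, 0, 5]]): A returns 1, B returns 0
import Mathlib
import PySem

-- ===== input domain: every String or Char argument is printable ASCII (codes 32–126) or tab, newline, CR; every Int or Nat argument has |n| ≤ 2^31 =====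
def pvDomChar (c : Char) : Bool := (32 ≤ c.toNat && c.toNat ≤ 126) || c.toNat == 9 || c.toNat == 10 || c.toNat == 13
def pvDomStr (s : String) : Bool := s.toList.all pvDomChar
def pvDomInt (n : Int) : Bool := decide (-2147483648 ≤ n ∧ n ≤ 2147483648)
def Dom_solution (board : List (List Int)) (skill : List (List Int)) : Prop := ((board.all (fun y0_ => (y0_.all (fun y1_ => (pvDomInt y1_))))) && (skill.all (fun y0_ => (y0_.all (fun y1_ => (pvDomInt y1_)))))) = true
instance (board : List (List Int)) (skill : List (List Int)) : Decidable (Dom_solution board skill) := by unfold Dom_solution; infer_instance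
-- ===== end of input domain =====

-- B replaces A's padded difference grid, corner-delta stamping and two prefix-sum passes by
-- a board-sized damage grid filled by adding each skill's amount directly over its rectangle.

-- ===== PORT A =====
-- check[i][j]  (all indices reached here are nonnegative and in range under Pre_solution;
-- Python raises or wraps around outside that, which Pre_solution excludes, so getD is exact)
def pvGet2 (g : List (List Int)) (i j : Nat) : Int := (g.getD i []).getD j 0

-- check[i][j] += v
def pvBump (g : List (List Int)) (i j : Nat) (v : Int) : List (List Int) :=
  g.modify i (fun row => row.modify j (fun x => x + v))

-- body of A's first loop: the four corner stamps of one skill k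
-- (k[m] is k.getD m 0 — exact under Pre_solution, which demands 6 ≤ k.length; the .toNat on
-- the coordinates is exact because Pre_solution demands them nonnegative)
def pvStamp (g : List (List Int)) (k : List Int) : List (List Int) :=
  let n : Int := if k.getD 0 0 = 1 then k.getD 5 0 else -(k.getD 5 0)
  let r1 := (k.getD 1 0).toNat
  let c1 := (k.getD 2 0).toNat
  let r2 := (k.getD 3 0).toNat
  let c2 := (k.getD 4 0).toNat
  pvBump (pvBump (pvBump (pvBump g r1 c1 n) (r2+1) c1 (-n)) r1 (c2+1) (-n)) (r2+1) (c2+1) n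

-- A's second loop: for i in range(len(check)-1): for j in range(len(check[0])-1): check[i][j+1] += check[i][j]
def pvRowPass (g : List (List Int)) : List (List Int) :=
  (List.range (g.length - 1)).foldl (fun g i =>
    (List.range ((g.getD 0 []).length - 1)).foldl (fun g j =>
      pvBump g i (j+1) (pvGet2 g i j)) g) g

-- A's third loop: for i in range(len(check)-1): for j in range(len(check[0])-1): check[i+1][j] += check[i][j]
def pvColPass (g : List (List Int)) : List (List Int) :=
  (List.range (g.length - 1)).foldl (fun g i =>
    (List.range ((g.getD 0 []).length - 1)).foldl (fun g j =>
      pvBump g (i+1) j (pvGet2 g i j)) g) g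

def solution (board : List (List Int)) (skill : List (List Int)) : Int :=
  -- check = [[0]*(len(board[0])+1) for _ in range(len(board)+1)], then the three passes,
  -- then the counting loop over the board
  let check0 : List (List Int) :=
    List.replicate (board.length + 1) (List.replicate ((board.getD 0 []).length + 1) 0)
  let check := pvColPass (pvRowPass (skill.foldl pvStamp check0))
  (List.range board.length).foldl (fun answer i =>
    (List.range ((board.getD 0 []).length)).foldl (fun answer j =>
      if (board.getD i []).getD j 0 - pvGet2 check i j > 0 then answer + 1 else answer) answer) 0

-- ===== PORT B =====
-- damage[i][j] += v  (indices reached here are nonnegative and in range under Pre_solution;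
-- Python wraps or raises outside that, which Pre_solution excludes)
def pvAdd (d : List (List Int)) (i j : Nat) (v : Int) : List (List Int) :=
  d.modify i (fun row => row.modify j (fun x => x + v))

-- body of B's stamping loop for one skill k:
--   n = k[5] if k[0]==1 else -k[5]; for i in range(k[1], k[3]+1): for j in range(k[2], k[4]+1): damage[i][j] += n
-- (k[m] is k.getD m 0 and the index casts are .toNat — exact under Pre_solution, which
-- demands 6 ≤ k.length and nonnegative in-range coordinates)
def pvStampB (dmg : List (List Int)) (k : List Int) : List (List Int) :=
  let n : Int := if k.getD 0 0 = 1 then k.getD 5 0 else -(k.getD 5 0)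
  (PySem.List.pyRange (k.getD 1 0) (k.getD 3 0 + 1) 1).foldl (fun dmg i =>
    (PySem.List.pyRange (k.getD 2 0) (k.getD 4 0 + 1) 1).foldl (fun dmg j =>
      pvAdd dmg i.toNat j.toNat n) dmg) dmg

def solution_alt (board : List (List Int)) (skill : List (List Int)) : Int :=
  -- damage = [[0]*cols for _ in range(rows)]; stamp every skill rectangle; count survivors
  let damage : List (List Int) :=
    List.replicate board.length (List.replicate ((board.getD 0 []).length) 0)
  let damage := skill.foldl pvStampB damage
  (List.range board.length).foldl (fun count i =>
    (List.range ((board.getD 0 []).length)).foldl (fun count j =>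
      if (board.getD i []).getD j 0 - (damage.getD i []).getD j 0 > 0 then count + 1 else count) count) 0

-- ===== PRECONDITION & SPEC =====
-- a well-formed skill row: length ≥ 6 and a real (non-inverted) rectangle inside the board
abbrev ValidSkill (R C : Nat) (k : List Int) : Prop :=
  6 ≤ k.length ∧
  0 ≤ k.getD 1 0 ∧ k.getD 1 0 ≤ k.getD 3 0 ∧ k.getD 3 0 < (R : Int) ∧
  0 ≤ k.getD 2 0 ∧ k.getD 2 0 ≤ k.getD 4 0 ∧ k.getD 4 0 < (C : Int)

-- Pre_ excludes inputs on which A raises (empty board, board rows shorter than row 0, skill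
-- rows shorter than 6 or with coordinates past the check grid) and skills with negative or
-- inverted coordinates, on which A still returns but the value is an accident of its
-- difference-grid wraparound (see the cited examples in the claim).
def Pre_solution (board : List (List Int)) (skill : List (List Int)) : Prop :=
  board ≠ [] ∧
  (∀ row ∈ board, (board.getD 0 []).length ≤ row.length) ∧
  (∀ k ∈ skill, ValidSkill board.length ((board.getD 0 []).length) k)

instance (board : List (List Int)) (skill : List (List Int)) : Decidable (Pre_solution board skill) := by
  unfold Pre_solution; infer_instance

def pvWitness_solution : List (List Int) × List (List Int) :=
  ([[1, 2], [3, 4]], [[1, 0, 0, 1, 1, 3]])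

def Spec_solution (board : List (List Int)) (skill : List (List Int)) (out : Int) : Prop := out = solution_alt board skill
instance (board : List (List Int)) (skill : List (List Int)) (out : Int) : Decidable (Spec_solution board skill out) := by unfold Spec_solution; infer_instance

-- ===== CLAIM (what is proved, stated in full; the proofs are below) =====
def Claim_equal_solution : Prop := ∀ (board : List (List Int)) (skill : List (List Int)), Dom_solution board skill → Pre_solution board skill → Spec_solution board skill (solution board skill)

-- ===== LEMMAS AND PROOFS =====

theorem getD_modify {α : Type} (l : List α) (a : Nat) (f : α → α) (i : Nat) (d : α) :
    (l.modify a f).getD i d = if i = a ∧ i < l.length then f (l.getD i d) else l.getD i d := by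
  simp only [List.getD_eq_getElem?_getD, List.getElem?_modify]
  by_cases hia : i = a
  · subst hia
    by_cases hlt : i < l.length
    · simp [hlt]
    · rw [List.getElem?_eq_none (by omega)]; simp [hlt]
  · simp only [show a ≠ i from fun h => hia h.symm, if_false]
    cases l[i]? <;> simp [hia]

theorem modify_modify {α : Type} (l : List α) (a : Nat) (f g : α → α) :
    (l.modify a f).modify a g = l.modify a (fun x => g (f x)) := by
  apply List.ext_getElem?
  intro i
  simp only [List.getElem?_modify]
  by_cases h : a = i <;> cases l[i]? <;> simp [h]

theorem modify_congr {α : Type} (l : List α) (a : Nat) (d : α) (f f' : α → α)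
    (ha : a < l.length) (h : f (l.getD a d) = f' (l.getD a d)) :
    l.modify a f = l.modify a f' := by
  apply List.ext_getElem?
  intro n
  simp only [List.getElem?_modify]
  by_cases han : a = n
  · subst han
    rw [List.getElem?_eq_getElem ha]
    rw [List.getD_eq_getElem?_getD, List.getElem?_eq_getElem ha] at h
    simpa using h
  · simp [han]

def pref (f : Nat → Int) : Nat → Int
  | 0 => f 0
  | n+1 => pref f n + f (n+1)

theorem pref_congr {f g : Nat → Int} (n : Nat) (h : ∀ x ≤ n, f x = g x) : pref f n = pref g n := by
  induction n with
  | zero => simpa [pref] using h 0 (by omega)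
  | succ n ih => simp [pref, ih (fun x hx => h x (by omega)), h (n+1) (by omega)]

theorem pref_add (f g : Nat → Int) (n : Nat) :
    pref (fun x => f x + g x) n = pref f n + pref g n := by
  induction n with
  | zero => simp [pref]
  | succ n ih => simp [pref, ih]; ring

theorem pref_zero_fun (n : Nat) : pref (fun _ => (0:Int)) n = 0 := by
  induction n with
  | zero => simp [pref]
  | succ n ih => simp [pref, ih]

theorem pref_mul_left (c : Int) (f : Nat → Int) (n : Nat) :
    pref (fun x => c * f x) n = c * pref f n := by
  induction n with
  | zero => simp [pref]
  | succ n ih => simp [pref, ih]; ring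

theorem pref_sum_map {α : Type} (l : List α) (h : α → Nat → Int) (n : Nat) :
    pref (fun x => (l.map (fun k => h k x)).sum) n = (l.map (fun k => pref (h k) n)).sum := by
  induction l with
  | nil => simp [pref_zero_fun]
  | cons k l ih => simp [← ih, ← pref_add]

theorem pref_ind (a b : Int) (h0 : 0 ≤ a) (hab : a ≤ b) (n : Nat) :
    pref (fun x => (if (x:Int) = a then (1:Int) else 0) - (if (x:Int) = b + 1 then 1 else 0)) n =
      if a ≤ (n:Int) ∧ (n:Int) ≤ b then 1 else 0 := by
  induction n with
  | zero => simp only [pref]; norm_num; split_ifs <;> omega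
  | succ n ih =>
    simp only [pref, ih]
    push_cast
    split_ifs <;> omega

def Sh (R C : Nat) (g : List (List Int)) : Prop :=
  g.length = R + 1 ∧ ∀ i < R + 1, (g.getD i []).length = C + 1

theorem pvGet2_bump (g : List (List Int)) (a b : Nat) (v : Int) (i j : Nat)
    (ha : a < g.length) (hb : b < (g.getD a []).length) :
    pvGet2 (pvBump g a b v) i j =
      if i = a ∧ j = b then pvGet2 g i j + v else pvGet2 g i j := by
  unfold pvGet2 pvBump
  rw [getD_modify]
  by_cases hia : i = a
  · subst hia
    rw [if_pos ⟨rfl, ha⟩, getD_modify]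
    split_ifs <;> simp_all
  · simp [hia]

theorem Sh_bump {R C : Nat} {g : List (List Int)} (hSh : Sh R C g) (a b : Nat) (v : Int) :
    Sh R C (pvBump g a b v) := by
  obtain ⟨hlen, hrow⟩ := hSh
  refine ⟨by simp [pvBump, hlen], fun i hi => ?_⟩
  unfold pvBump
  rw [getD_modify]
  split_ifs with h
  · rw [List.length_modify]
    exact hrow i hi
  · exact hrow i hi

def nkOf (k : List Int) : Int := if k.getD 0 0 = 1 then k.getD 5 0 else -(k.getD 5 0)

def eRow (k : List Int) (i : Nat) : Int :=
  (if (i:Int) = k.getD 1 0 then 1 else 0) - (if (i:Int) = k.getD 3 0 + 1 then 1 else 0)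

def eCol (k : List Int) (j : Nat) : Int :=
  (if (j:Int) = k.getD 2 0 then 1 else 0) - (if (j:Int) = k.getD 4 0 + 1 then 1 else 0)

theorem Sh_stamp {R C : Nat} {g : List (List Int)} (hSh : Sh R C g) (k : List Int) :
    Sh R C (pvStamp g k) := by
  unfold pvStamp
  exact Sh_bump (Sh_bump (Sh_bump (Sh_bump hSh _ _ _) _ _ _) _ _ _) _ _ _

set_option maxHeartbeats 1000000 in
theorem pvGet2_stamp {R C : Nat} {g : List (List Int)} (hSh : Sh R C g) {k : List Int}
    (hk : ValidSkill R C k) (i j : Nat) :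
    pvGet2 (pvStamp g k) i j = pvGet2 g i j + nkOf k * eRow k i * eCol k j := by
  obtain ⟨hl, h1, h13, h3, h2, h24, h4⟩ := hk
  have s1 := Sh_bump hSh (k.getD 1 0).toNat (k.getD 2 0).toNat
      (if k.getD 0 0 = 1 then k.getD 5 0 else -(k.getD 5 0))
  have s2 := Sh_bump s1 ((k.getD 3 0).toNat+1) (k.getD 2 0).toNat
      (-(if k.getD 0 0 = 1 then k.getD 5 0 else -(k.getD 5 0)))
  have s3 := Sh_bump s2 (k.getD 1 0).toNat ((k.getD 4 0).toNat+1)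
      (-(if k.getD 0 0 = 1 then k.getD 5 0 else -(k.getD 5 0)))
  simp only [pvStamp]
  rw [pvGet2_bump _ _ _ _ _ _ (by rw [s3.1]; omega) (by rw [s3.2 _ (by omega)]; omega)]
  rw [pvGet2_bump _ _ _ _ _ _ (by rw [s2.1]; omega) (by rw [s2.2 _ (by omega)]; omega)]
  rw [pvGet2_bump _ _ _ _ _ _ (by rw [s1.1]; omega) (by rw [s1.2 _ (by omega)]; omega)]
  rw [pvGet2_bump _ _ _ _ _ _ (by rw [hSh.1]; omega) (by rw [hSh.2 _ (by omega)]; omega)]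
  unfold nkOf eRow eCol
  generalize (if k.getD 0 0 = 1 then k.getD 5 0 else -(k.getD 5 0)) = n
  have e1 : (i = (k.getD 1 0).toNat ∧ j = (k.getD 2 0).toNat) ↔ ((i:Int) = k.getD 1 0 ∧ (j:Int) = k.getD 2 0) := by omega
  have e2 : (i = (k.getD 3 0).toNat + 1 ∧ j = (k.getD 2 0).toNat) ↔ ((i:Int) = k.getD 3 0 + 1 ∧ (j:Int) = k.getD 2 0) := by omega
  have e3 : (i = (k.getD 1 0).toNat ∧ j = (k.getD 4 0).toNat + 1) ↔ ((i:Int) = k.getD 1 0 ∧ (j:Int) = k.getD 4 0 + 1) := by omega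
  have e4 : (i = (k.getD 3 0).toNat + 1 ∧ j = (k.getD 4 0).toNat + 1) ↔ ((i:Int) = k.getD 3 0 + 1 ∧ (j:Int) = k.getD 4 0 + 1) := by omega
  simp only [e1, e2, e3, e4]
  split_ifs <;> ring_nf <;> omega

theorem fold_stamp_char {R C : Nat} (skill : List (List Int)) (g : List (List Int))
    (hSh : Sh R C g) (hv : ∀ k ∈ skill, ValidSkill R C k) :
    Sh R C (skill.foldl pvStamp g) ∧ ∀ i j : Nat,
      pvGet2 (skill.foldl pvStamp g) i j =
        pvGet2 g i j + (skill.map (fun k => nkOf k * eRow k i * eCol k j)).sum := by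
  induction skill generalizing g with
  | nil => simp [hSh]
  | cons k skill ih =>
    have hk := hv k (by simp)
    obtain ⟨ihSh, ihget⟩ := ih (pvStamp g k) (Sh_stamp hSh k) (fun k hkm => hv k (by simp [hkm]))
    refine ⟨by simpa using ihSh, fun i j => ?_⟩
    simp only [List.foldl_cons, List.map_cons, List.sum_cons]
    rw [ihget i j, pvGet2_stamp hSh hk]
    ring

theorem Sh_init (R C : Nat) : Sh R C (List.replicate (R + 1) (List.replicate (C + 1) 0)) := by
  refine ⟨by simp, fun i hi => ?_⟩
  rw [List.getD_eq_getElem?_getD, List.getElem?_replicate, if_pos (by simpa using hi)]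
  simp

theorem pvGet2_init (R C i j : Nat) :
    pvGet2 (List.replicate (R + 1) (List.replicate (C + 1) 0)) i j = 0 := by
  simp only [pvGet2, List.getD_eq_getElem?_getD, List.getElem?_replicate]
  split_ifs <;> simp

def rowOp (m : Nat) (row : List Int) : List Int :=
  (List.range m).foldl (fun row j => row.modify (j+1) (fun x => x + row.getD j 0)) row

theorem rowOp_succ (m : Nat) (row : List Int) :
    rowOp (m+1) row = (rowOp m row).modify (m+1) (fun x => x + (rowOp m row).getD m 0) := by
  unfold rowOp
  rw [List.range_succ, List.foldl_append]
  simp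

theorem length_rowOp (m : Nat) (row : List Int) : (rowOp m row).length = row.length := by
  induction m with
  | zero => rfl
  | succ m ih => rw [rowOp_succ, List.length_modify, ih]

theorem inner_row_eq_modify (g : List (List Int)) (i : Nat) (hi : i < g.length) (m : Nat) :
    (List.range m).foldl (fun g j => pvBump g i (j+1) (pvGet2 g i j)) g = g.modify i (rowOp m) := by
  induction m with
  | zero =>
    have : rowOp 0 = @id (List Int) := funext fun r => rfl
    simp only [List.range_zero, List.foldl_nil]
    rw [this, List.modify_id]
  | succ m ih =>
    rw [List.range_succ, List.foldl_append, ih]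
    simp only [List.foldl_cons, List.foldl_nil]
    have hg : pvGet2 (g.modify i (rowOp m)) i m = (rowOp m (g.getD i [])).getD m 0 := by
      unfold pvGet2
      rw [getD_modify, if_pos ⟨rfl, hi⟩]
    rw [hg]
    unfold pvBump
    rw [modify_modify]
    exact modify_congr g i [] _ _ hi (by rw [rowOp_succ])

theorem rowOp_getD {C : Nat} (row : List Int) (hlen : row.length = C + 1) (m : Nat)
    (hm : m ≤ C) (j : Nat) :
    (rowOp m row).getD j 0 = if j ≤ m then pref (fun x => row.getD x 0) j else row.getD j 0 := by
  revert hm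
  induction m generalizing j with
  | zero =>
    intro hm
    split_ifs with h
    · have : j = 0 := by omega
      subst this; rfl
    · rfl
  | succ m ih =>
    intro hm
    rw [rowOp_succ, getD_modify, length_rowOp, hlen]
    split_ifs with h h2 h2
    · obtain ⟨hj, _⟩ := h
      subst hj
      rw [ih (m+1) (by omega), if_neg (by omega), ih m (by omega), if_pos (le_refl m)]
      simp [pref]; ring
    · omega
    · rw [ih j (by omega), if_pos (by omega)]
    · rw [ih j (by omega), if_neg (by omega)]

theorem rowPass_aux {R C : Nat} {g : List (List Int)} (hSh : Sh R C g) :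
    ∀ m, m ≤ R →
      Sh R C ((List.range m).foldl (fun g i =>
        (List.range ((g.getD 0 []).length - 1)).foldl (fun g j =>
          pvBump g i (j+1) (pvGet2 g i j)) g) g) ∧
      ∀ i j : Nat, i ≤ R → j ≤ C →
        pvGet2 ((List.range m).foldl (fun g i =>
          (List.range ((g.getD 0 []).length - 1)).foldl (fun g j =>
            pvBump g i (j+1) (pvGet2 g i j)) g) g) i j =
          if i < m then pref (fun x => pvGet2 g i x) j else pvGet2 g i j := by
  intro m
  induction m with
  | zero =>
    intro _
    refine ⟨by simpa using hSh, fun i j _ _ => ?_⟩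
    simp
  | succ m ih =>
    intro hm
    obtain ⟨Sh', Hg⟩ := ih (by omega)
    rw [List.range_succ, List.foldl_append]
    simp only [List.foldl_cons, List.foldl_nil]
    set g' := (List.range m).foldl (fun g i =>
        (List.range ((g.getD 0 []).length - 1)).foldl (fun g j =>
          pvBump g i (j+1) (pvGet2 g i j)) g) g with hg'
    have hlen0 : (g'.getD 0 []).length = C + 1 := Sh'.2 0 (by omega)
    rw [hlen0]
    simp only [Nat.add_sub_cancel]
    rw [inner_row_eq_modify g' m (by rw [Sh'.1]; omega) C]
    refine ⟨⟨by rw [List.length_modify]; exact Sh'.1, fun i hi => ?_⟩, fun i j hi hj => ?_⟩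
    · rw [getD_modify]
      split_ifs with h
      · rw [length_rowOp]
        exact h.1 ▸ Sh'.2 i hi
      · exact Sh'.2 i hi
    · show ((g'.modify m (rowOp C)).getD i []).getD j 0 = _
      rw [getD_modify]
      by_cases him : i = m
      · subst him
        rw [if_pos ⟨rfl, by rw [Sh'.1]; omega⟩]
        rw [rowOp_getD (g'.getD i []) (Sh'.2 i (by omega)) C (le_refl C) j, if_pos hj]
        rw [if_pos (by omega)]
        apply pref_congr
        intro x hx
        have hx2 := Hg i x (by omega) (by omega)
        rw [if_neg (by omega)] at hx2
        exact hx2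
      · rw [if_neg (by simp [him])]
        show pvGet2 g' i j = _
        rw [Hg i j hi hj]
        by_cases hlt : i < m
        · rw [if_pos hlt, if_pos (by omega)]
        · rw [if_neg hlt, if_neg (by omega)]

theorem rowPass_char {R C : Nat} {g : List (List Int)} (hSh : Sh R C g) :
    Sh R C (pvRowPass g) ∧ ∀ i j : Nat, i ≤ R → j ≤ C →
      pvGet2 (pvRowPass g) i j =
        if i < R then pref (fun x => pvGet2 g i x) j else pvGet2 g i j := by
  have h := rowPass_aux hSh R (le_refl R)
  unfold pvRowPass
  rw [hSh.1]
  simpa using h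

def colOp (m : Nat) (src row : List Int) : List Int :=
  (List.range m).foldl (fun row j => row.modify j (fun x => x + src.getD j 0)) row

theorem colOp_succ (m : Nat) (src row : List Int) :
    colOp (m+1) src row = (colOp m src row).modify m (fun x => x + src.getD m 0) := by
  unfold colOp
  rw [List.range_succ, List.foldl_append]
  simp

theorem length_colOp (m : Nat) (src row : List Int) : (colOp m src row).length = row.length := by
  induction m with
  | zero => rfl
  | succ m ih => rw [colOp_succ, List.length_modify, ih]

theorem inner_col_eq_modify (g : List (List Int)) (i : Nat) (m : Nat) :
    (List.range m).foldl (fun g j => pvBump g (i+1) j (pvGet2 g i j)) g =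
      g.modify (i+1) (colOp m (g.getD i [])) := by
  induction m with
  | zero =>
    have : colOp 0 (g.getD i []) = @id (List Int) := funext fun r => rfl
    simp only [List.range_zero, List.foldl_nil]
    rw [this, List.modify_id]
  | succ m ih =>
    rw [List.range_succ, List.foldl_append, ih]
    simp only [List.foldl_cons, List.foldl_nil]
    have hg : pvGet2 (g.modify (i+1) (colOp m (g.getD i []))) i m = (g.getD i []).getD m 0 := by
      unfold pvGet2
      rw [getD_modify, if_neg (by omega)]
    rw [hg]
    unfold pvBump
    rw [modify_modify]
    congr 1
    funext row
    rw [colOp_succ]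

theorem colOp_getD {C : Nat} (src row : List Int) (hlen : row.length = C + 1) (m : Nat)
    (hm : m ≤ C) (j : Nat) :
    (colOp m src row).getD j 0 = if j < m then row.getD j 0 + src.getD j 0 else row.getD j 0 := by
  revert hm
  induction m generalizing j with
  | zero => intro _; simp [colOp]
  | succ m ih =>
    intro hm
    rw [colOp_succ, getD_modify, length_colOp, hlen]
    split_ifs with h h2 h2
    · obtain ⟨hj, _⟩ := h
      subst hj
      rw [ih j (by omega), if_neg (by omega)]
    · omega
    · rw [ih j (by omega), if_pos (by omega)]
    · rw [ih j (by omega), if_neg (by omega)]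

theorem colPass_aux {R C : Nat} {g : List (List Int)} (hSh : Sh R C g) :
    ∀ m, m ≤ R →
      Sh R C ((List.range m).foldl (fun g i =>
        (List.range ((g.getD 0 []).length - 1)).foldl (fun g j =>
          pvBump g (i+1) j (pvGet2 g i j)) g) g) ∧
      ∀ i j : Nat, i ≤ R → j ≤ C →
        pvGet2 ((List.range m).foldl (fun g i =>
          (List.range ((g.getD 0 []).length - 1)).foldl (fun g j =>
            pvBump g (i+1) j (pvGet2 g i j)) g) g) i j =
          if i ≤ m ∧ j < C then pref (fun x => pvGet2 g x j) i else pvGet2 g i j := by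
  intro m
  induction m with
  | zero =>
    intro _
    refine ⟨by simpa using hSh, fun i j _ _ => ?_⟩
    simp only [List.range_zero, List.foldl_nil]
    split_ifs with h
    · have : i = 0 := by omega
      subst this
      rfl
    · rfl
  | succ m ih =>
    intro hm
    obtain ⟨Sh', Hg⟩ := ih (by omega)
    rw [List.range_succ, List.foldl_append]
    simp only [List.foldl_cons, List.foldl_nil]
    set g' := (List.range m).foldl (fun g i =>
        (List.range ((g.getD 0 []).length - 1)).foldl (fun g j =>
          pvBump g (i+1) j (pvGet2 g i j)) g) g with hg'
    have hlen0 : (g'.getD 0 []).length = C + 1 := Sh'.2 0 (by omega)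
    rw [hlen0]
    simp only [Nat.add_sub_cancel]
    rw [inner_col_eq_modify g' m C]
    refine ⟨⟨by rw [List.length_modify]; exact Sh'.1, fun i hi => ?_⟩, fun i j hi hj => ?_⟩
    · rw [getD_modify]
      split_ifs with h
      · rw [length_colOp]
        exact h.1 ▸ Sh'.2 i hi
      · exact Sh'.2 i hi
    · show ((g'.modify (m+1) (colOp C (g'.getD m []))).getD i []).getD j 0 = _
      rw [getD_modify]
      by_cases him : i = m + 1
      · subst him
        rw [if_pos ⟨rfl, by rw [Sh'.1]; omega⟩]
        rw [colOp_getD (g'.getD m []) (g'.getD (m+1) []) (Sh'.2 (m+1) (by omega)) C (le_refl C) j]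
        by_cases hjC : j < C
        · rw [if_pos hjC, if_pos ⟨by omega, hjC⟩]
          have h1 : pvGet2 g' (m+1) j = pvGet2 g (m+1) j := by
            rw [Hg (m+1) j (by omega) hj, if_neg (by omega)]
          have h2 : pvGet2 g' m j = pref (fun x => pvGet2 g x j) m := by
            rw [Hg m j (by omega) hj, if_pos ⟨le_refl m, hjC⟩]
          show pvGet2 g' (m+1) j + pvGet2 g' m j = _
          rw [h1, h2]
          simp [pref]
          ring
        · rw [if_neg hjC, if_neg (by omega)]
          show pvGet2 g' (m+1) j = _
          rw [Hg (m+1) j (by omega) hj, if_neg (by omega)]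
      · rw [if_neg (by simp [him])]
        show pvGet2 g' i j = _
        rw [Hg i j hi hj]
        by_cases hc : i ≤ m ∧ j < C
        · rw [if_pos hc, if_pos ⟨by omega, hc.2⟩]
        · rw [if_neg hc, if_neg (by omega)]

theorem colPass_char {R C : Nat} {g : List (List Int)} (hSh : Sh R C g) :
    ∀ i j : Nat, i ≤ R → j < C →
      pvGet2 (pvColPass g) i j = pref (fun x => pvGet2 g x j) i := by
  intro i j hi hj
  have h := (colPass_aux hSh R (le_refl R)).2 i j hi (by omega)
  unfold pvColPass
  rw [hSh.1]
  simp only [Nat.add_sub_cancel]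
  rw [h, if_pos ⟨hi, hj⟩]

theorem pvAdd_eq_pvBump : pvAdd = pvBump := rfl

theorem length_bump (d : List (List Int)) (a b : Nat) (v : Int) :
    (pvBump d a b v).length = d.length := by
  unfold pvBump; rw [List.length_modify]

theorem row_length_bump (d : List (List Int)) (a b : Nat) (v : Int) (i : Nat) :
    ((pvBump d a b v).getD i []).length = (d.getD i []).length := by
  unfold pvBump
  rw [getD_modify]
  split_ifs with h
  · rw [List.length_modify, h.1]
  · rfl

theorem inner_shape (iN : Nat) (n : Int) (js : List Int) :
    ∀ d : List (List Int),
      ((js.foldl (fun d j => pvBump d iN j.toNat n) d).length = d.length) ∧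
      (∀ i : Nat, ((js.foldl (fun d j => pvBump d iN j.toNat n) d).getD i []).length = (d.getD i []).length) := by
  induction js with
  | nil => intro d; exact ⟨rfl, fun _ => rfl⟩
  | cons j js ih =>
    intro d
    simp only [List.foldl_cons]
    refine ⟨(ih _).1.trans (length_bump _ _ _ _), fun i => (ih _).2 i |>.trans (row_length_bump _ _ _ _ _)⟩

theorem stampB_inner_aux {C : Nat} (iN : Nat) (n : Int) (b : Int) (hb : b ≤ (C:Int)) :
    ∀ (m : Nat) (a : Int) (d : List (List Int)), (b - a).toNat = m → 0 ≤ a →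
      iN < d.length → (d.getD iN []).length = C →
      ∀ x y : Nat,
        pvGet2 ((PySem.List.pyRange a b 1).foldl (fun d j => pvBump d iN j.toNat n) d) x y
          = pvGet2 d x y + (if x = iN ∧ a ≤ (y:Int) ∧ (y:Int) < b then n else 0) := by
  intro m
  induction m with
  | zero =>
    intro a d hm h0 hi hC x y
    have hcond : ¬(x = iN ∧ a ≤ (y:Int) ∧ (y:Int) < b) := by
      rintro ⟨-, hh1, hh2⟩
      omega
    rw [PySem.List.pyRange_one_eq_nil (by omega), if_neg hcond]
    simp
  | succ m ih =>
    intro a d hm h0 hi hC x y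
    rw [PySem.List.pyRange_one_cons (by omega)]
    simp only [List.foldl_cons]
    rw [ih (a+1) (pvBump d iN a.toNat n) (by omega) (by omega)
      (by rw [length_bump]; exact hi) (by rw [row_length_bump]; exact hC) x y]
    rw [pvGet2_bump d iN a.toNat n x y hi (by rw [hC]; omega)]
    split_ifs <;> omega

theorem outer_shape (iNs : List Int) (f : Int → List Int) (n : Int) :
    ∀ d : List (List Int),
      ((iNs.foldl (fun d i => (f i).foldl (fun d j => pvBump d i.toNat j.toNat n) d) d).length = d.length) ∧
      (∀ q : Nat, ((iNs.foldl (fun d i => (f i).foldl (fun d j => pvBump d i.toNat j.toNat n) d) d).getD q []).length = (d.getD q []).length) := by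
  induction iNs with
  | nil => intro d; exact ⟨rfl, fun _ => rfl⟩
  | cons i is ih =>
    intro d
    simp only [List.foldl_cons]
    exact ⟨(ih _).1.trans (inner_shape i.toNat n (f i) d).1,
           fun q => ((ih _).2 q).trans ((inner_shape i.toNat n (f i) d).2 q)⟩

theorem stampB_outer_aux {R C : Nat} (n c1 c4 : Int) (hc1 : 0 ≤ c1) (hc4 : c4 + 1 ≤ (C:Int))
    (b : Int) (hbR : b ≤ (R:Int)) :
    ∀ (m : Nat) (a : Int) (d : List (List Int)), (b - a).toNat = m → 0 ≤ a →
      d.length = R → (∀ i : Nat, i < R → (d.getD i []).length = C) →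
      ∀ x y : Nat,
        pvGet2 ((PySem.List.pyRange a b 1).foldl (fun d i =>
          (PySem.List.pyRange c1 (c4+1) 1).foldl (fun d j => pvBump d i.toNat j.toNat n) d) d) x y
          = pvGet2 d x y + (if a ≤ (x:Int) ∧ (x:Int) < b ∧ c1 ≤ (y:Int) ∧ (y:Int) ≤ c4 then n else 0) := by
  intro m
  induction m with
  | zero =>
    intro a d hm h0 hlen hrows x y
    have hcond : ¬(a ≤ (x:Int) ∧ (x:Int) < b ∧ c1 ≤ (y:Int) ∧ (y:Int) ≤ c4) := by
      rintro ⟨hh1, hh2, -⟩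
      omega
    have hnil : PySem.List.pyRange a b 1 = [] := PySem.List.pyRange_one_eq_nil (by omega)
    rw [hnil, if_neg hcond]
    simp
  | succ m ih =>
    intro a d hm h0 hlen hrows x y
    have hcons : PySem.List.pyRange a b 1 = a :: PySem.List.pyRange (a+1) b 1 :=
      PySem.List.pyRange_one_cons (by omega)
    rw [hcons]
    simp only [List.foldl_cons]
    have hsh := inner_shape a.toNat n (PySem.List.pyRange c1 (c4+1) 1) d
    have hm2 : (b - (a+1)).toNat = m := by omega
    have h02 : (0:Int) ≤ a + 1 := by omega
    rw [ih (a+1) _ hm2 h02 (hsh.1.trans hlen)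
        (fun i hiR => (hsh.2 i).trans (hrows i hiR)) x y]
    have hiN : a.toNat < d.length := by omega
    rw [stampB_inner_aux a.toNat n (c4+1) hc4 ((c4+1) - c1).toNat c1 d rfl hc1
        hiN (hrows a.toNat (by omega)) x y]
    split_ifs <;> omega

def dSum (skill : List (List Int)) (i j : Nat) : Int :=
  (skill.map (fun k => nkOf k *
    (if k.getD 1 0 ≤ (i:Int) ∧ (i:Int) ≤ k.getD 3 0 then 1 else 0) *
    (if k.getD 2 0 ≤ (j:Int) ∧ (j:Int) ≤ k.getD 4 0 then 1 else 0))).sum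

theorem stampB_char {R C : Nat} {d : List (List Int)} (hlen : d.length = R)
    (hrows : ∀ i : Nat, i < R → (d.getD i []).length = C) {k : List Int} (hk : ValidSkill R C k) :
    ((pvStampB d k).length = R ∧ ∀ i : Nat, i < R → ((pvStampB d k).getD i []).length = C) ∧
    ∀ x y : Nat, pvGet2 (pvStampB d k) x y = pvGet2 d x y + nkOf k *
      (if k.getD 1 0 ≤ (x:Int) ∧ (x:Int) ≤ k.getD 3 0 then 1 else 0) *
      (if k.getD 2 0 ≤ (y:Int) ∧ (y:Int) ≤ k.getD 4 0 then 1 else 0) := by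
  obtain ⟨hl, h1, h13, h3, h2, h24, h4⟩ := hk
  simp only [pvStampB, pvAdd_eq_pvBump]
  simp only [show (if k.getD 0 0 = 1 then k.getD 5 0 else -(k.getD 5 0)) = nkOf k from rfl]
  have hout := outer_shape (PySem.List.pyRange (k.getD 1 0) (k.getD 3 0 + 1) 1)
      (fun _ => PySem.List.pyRange (k.getD 2 0) (k.getD 4 0 + 1) 1) (nkOf k) d
  refine ⟨⟨hout.1.trans hlen, fun i hiR => (hout.2 i).trans (hrows i hiR)⟩, fun x y => ?_⟩
  rw [stampB_outer_aux (nkOf k) (k.getD 2 0) (k.getD 4 0) h2 (by omega) (k.getD 3 0 + 1)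
      (by omega) ((k.getD 3 0 + 1) - k.getD 1 0).toNat (k.getD 1 0) d rfl h1 hlen hrows x y]
  split_ifs <;> simp <;> omega

theorem foldB_char {R C : Nat} (skill : List (List Int)) (d : List (List Int))
    (hlen : d.length = R) (hrows : ∀ i : Nat, i < R → (d.getD i []).length = C)
    (hv : ∀ k ∈ skill, ValidSkill R C k) :
    ((skill.foldl pvStampB d).length = R ∧
      ∀ i : Nat, i < R → ((skill.foldl pvStampB d).getD i []).length = C) ∧
    ∀ x y : Nat, pvGet2 (skill.foldl pvStampB d) x y = pvGet2 d x y + dSum skill x y := by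
  induction skill generalizing d with
  | nil => exact ⟨⟨hlen, hrows⟩, fun x y => by simp [dSum]⟩
  | cons k skill ih =>
    have hk := hv k (by simp)
    obtain ⟨⟨sl, sr⟩, sget⟩ := stampB_char hlen hrows hk
    obtain ⟨ihsh, ihget⟩ := ih (pvStampB d k) sl sr (fun k hkm => hv k (by simp [hkm]))
    refine ⟨by simpa using ihsh, fun x y => ?_⟩
    simp only [List.foldl_cons, dSum, List.map_cons, List.sum_cons]
    rw [ihget x y, sget x y]
    simp only [dSum]
    ring

theorem pvGet2_zeros (R C i j : Nat) :
    pvGet2 (List.replicate R (List.replicate C 0)) i j = 0 := by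
  simp only [pvGet2, List.getD_eq_getElem?_getD, List.getElem?_replicate]
  split_ifs <;> simp

theorem check_eq_dSum {R C : Nat} (skill : List (List Int))
    (hv : ∀ k ∈ skill, ValidSkill R C k) (i j : Nat) (hi : i < R) (hj : j < C) :
    pvGet2 (pvColPass (pvRowPass (skill.foldl pvStamp
        (List.replicate (R + 1) (List.replicate (C + 1) 0))))) i j = dSum skill i j := by
  obtain ⟨Sh1, H1⟩ := fold_stamp_char skill _ (Sh_init R C) hv
  obtain ⟨Sh2, H2⟩ := rowPass_char Sh1
  rw [colPass_char Sh2 i j (by omega) hj]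
  have step1 : pref (fun x => pvGet2 (pvRowPass (skill.foldl pvStamp
      (List.replicate (R + 1) (List.replicate (C + 1) 0)))) x j) i =
      pref (fun x => pref (fun y => (skill.map (fun k => nkOf k * eRow k x * eCol k y)).sum) j) i := by
    apply pref_congr
    intro x hx
    rw [H2 x j (by omega) (by omega), if_pos (by omega)]
    apply pref_congr
    intro y hy
    rw [H1 x y, pvGet2_init]
    ring
  rw [step1]
  have step2 : pref (fun x => pref (fun y => (skill.map (fun k => nkOf k * eRow k x * eCol k y)).sum) j) i =
      pref (fun x => (skill.map (fun k => nkOf k * eRow k x * pref (eCol k) j)).sum) i := by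
    apply pref_congr
    intro x _
    rw [pref_sum_map]
    congr 1
    apply List.map_congr_left
    intro k _
    exact pref_mul_left (nkOf k * eRow k x) (eCol k) j
  rw [step2, pref_sum_map]
  unfold dSum
  congr 1
  apply List.map_congr_left
  intro k hk
  obtain ⟨hl, h1, h13, h3, h2, h24, h4⟩ := hv k hk
  have hc : pref (fun x => nkOf k * eRow k x * pref (eCol k) j) i =
      nkOf k * pref (eCol k) j * pref (eRow k) i := by
    rw [← pref_mul_left (nkOf k * pref (eCol k) j) (eRow k) i]
    apply pref_congr
    intro x _
    ring
  rw [hc]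
  unfold eRow eCol
  rw [pref_ind _ _ h1 h13, pref_ind _ _ h2 h24]
  ring

theorem damage_eq_dSum {R C : Nat} (skill : List (List Int))
    (hv : ∀ k ∈ skill, ValidSkill R C k) (i j : Nat) :
    ((skill.foldl pvStampB (List.replicate R (List.replicate C 0))).getD i []).getD j 0 =
      dSum skill i j := by
  have hrows : ∀ q : Nat, q < R → ((List.replicate R (List.replicate C (0:Int))).getD q []).length = C := by
    intro q hq
    rw [List.getD_eq_getElem?_getD, List.getElem?_replicate, if_pos hq]
    simp
  obtain ⟨_, hget⟩ := foldB_char skill _ (List.length_replicate) hrows hv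
  have := hget i j
  rw [pvGet2_zeros] at this
  rw [show ((skill.foldl pvStampB (List.replicate R (List.replicate C 0))).getD i []).getD j 0
      = pvGet2 (skill.foldl pvStampB (List.replicate R (List.replicate C 0))) i j from rfl, this]
  ring

theorem solution_eq_alt (board : List (List Int)) (skill : List (List Int))
    (hv : ∀ k ∈ skill, ValidSkill board.length ((board.getD 0 []).length) k) :
    solution board skill = solution_alt board skill := by
  unfold solution solution_alt
  simp only [PySem.List.foldl_ite_add_one, PySem.List.foldl_add, zero_add]
  congr 1
  apply List.map_congr_left
  intro i hi
  have hiR : i < board.length := List.mem_range.mp hi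
  congr 1
  apply List.countP_congr
  intro j hj
  have hjC : j < (board.getD 0 []).length := List.mem_range.mp hj
  simp only [decide_eq_true_eq]
  rw [check_eq_dSum skill hv i j hiR hjC, damage_eq_dSum skill hv i j]

-- ===== VERDICT (by name: the statement is the Claim_ definition above) =====
theorem solution_spec : Claim_equal_solution := by
  intro board skill _ hpre
  show solution board skill = solution_alt board skill
  exact solution_eq_alt board skill hpre.2.2
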